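-- pv_equiv track=rewrite | github.com/AAEO04/ifa_lang | src/interpreter.py | _validate_network_target
-- ===== SOURCE A (Python) =====
-- def _validate_network_target(url: str) -> bool:
--     """Validate network target for SSRF protection.
--
--     Blocks:
--     - Localhost (127.x.x.x)
--     - Private IPs (10.x, 172.16-31.x, 192.168.x)
--     - Link-local (169.254.x.x)
--     - Cloud metadata (169.254.169.254)
--     """
--     if not url:
--         return False
--
--     url_lower = str(url).lower()
--
--     # Block common SSRF targets
--     blocked_patterns = [
--         '127.0.0.1', 'localhost', '0.0.0.0',
--         '169.254.169.254',  # AWS/GCP metadata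
--         '10.', '172.16.', '172.17.', '172.18.', '172.19.',
--         '172.20.', '172.21.', '172.22.', '172.23.',
--         '172.24.', '172.25.', '172.26.', '172.27.',
--         '172.28.', '172.29.', '172.30.', '172.31.',
--         '192.168.', '169.254.',
--         'file://', 'gopher://', 'dict://',
--     ]
--
--     for pattern in blocked_patterns:
--         if pattern in url_lower:
--             return False
--
--     return True
-- ===== SOURCE B (Python) =====
-- # Simpler: the 16 literal '172.16.'..'172.31.' patterns collapse into one
-- # arithmetic window check, and '169.254.169.254' is dropped because any hit of
-- # it is already a hit of '169.254.'.
-- _SIMPLE = (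
--     '127.0.0.1', 'localhost', '0.0.0.0',
--     '10.', '192.168.', '169.254.',
--     'file://', 'gopher://', 'dict://',
-- )
--
--
-- def _validate_network_target(url: str) -> bool:
--     if not url:
--         return False
--     s = str(url).lower()
--     if any(p in s for p in _SIMPLE):
--         return False
--     # private 172.16.0.0/12 prefixes: '172.' + two ASCII digits forming 16..31 + '.'
--     for i in range(len(s) - 6):
--         w = s[i:i + 7]
--         if w.startswith('172.') and w.endswith('.') \
--                 and w[4].isdigit() and w[5].isdigit() \
--                 and 16 <= (ord(w[4]) - 48) * 10 + (ord(w[5]) - 48) <= 31: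
--             return False
--     return True
-- ===== Notes on version B (the rewrite author's own statement) =====
-- stated objective: alternative
-- what changed: Collapsed A's 26-pattern substring loop into 9 plain substring tests plus one arithmetic window scan that recognises all sixteen '172.16.'-'172.31.' prefixes as '172.' + two digits with value in 16..31 + '.', and dropped '169.254.169.254' as subsumed by '169.254.'; trades the uniform pattern loop for a shorter pattern list plus an explicit position scan.
import Mathlib
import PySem

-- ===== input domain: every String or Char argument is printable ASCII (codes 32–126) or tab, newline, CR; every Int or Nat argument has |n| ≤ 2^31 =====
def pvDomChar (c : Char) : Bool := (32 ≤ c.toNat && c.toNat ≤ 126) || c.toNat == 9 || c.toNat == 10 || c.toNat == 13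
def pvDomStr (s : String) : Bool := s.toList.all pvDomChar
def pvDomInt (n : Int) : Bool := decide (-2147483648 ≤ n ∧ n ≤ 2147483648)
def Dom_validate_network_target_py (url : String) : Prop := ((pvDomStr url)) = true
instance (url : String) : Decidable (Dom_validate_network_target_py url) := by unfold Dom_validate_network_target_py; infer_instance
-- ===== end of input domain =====

-- B replaces A's 26-pattern substring loop by 9 plain substring tests plus ONE
-- arithmetic window scan covering all sixteen '172.16.'–'172.31.' prefixes
-- (and drops '169.254.169.254', subsumed by '169.254.'); objective: alternative.

-- ===== PORT A =====
-- A's blocked_patterns list, in order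
def pvBlockedA : List (List Char) :=
  ["127.0.0.1".toList, "localhost".toList, "0.0.0.0".toList,
   "169.254.169.254".toList,
   "10.".toList, "172.16.".toList, "172.17.".toList, "172.18.".toList, "172.19.".toList,
   "172.20.".toList, "172.21.".toList, "172.22.".toList, "172.23.".toList,
   "172.24.".toList, "172.25.".toList, "172.26.".toList, "172.27.".toList,
   "172.28.".toList, "172.29.".toList, "172.30.".toList, "172.31.".toList,
   "192.168.".toList, "169.254.".toList,
   "file://".toList, "gopher://".toList, "dict://".toList]

-- A's 'for pattern in blocked_patterns: if pattern in url_lower: return False'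
def pvLoopA (ps : List (List Char)) (s : List Char) : Bool :=
  match ps with
  | [] => true
  | p :: rest => if PySem.Chars.isIn p s then false else pvLoopA rest s

def validate_network_target_py (url : String) : Bool :=
  if url.toList = [] then false
  else pvLoopA pvBlockedA (PySem.Chars.lower url.toList)

-- ===== PORT B =====
-- B's _SIMPLE tuple
def pvSimpleB : List (List Char) :=
  ["127.0.0.1".toList, "localhost".toList, "0.0.0.0".toList,
   "10.".toList, "192.168.".toList, "169.254.".toList,
   "file://".toList, "gopher://".toList, "dict://".toList]

-- 'any(p in s for p in _SIMPLE)'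
def pvAnySimple (s : List Char) : Bool :=
  pvSimpleB.any (fun p => PySem.Chars.isIn p s)

-- the loop body at one position: w = s[i:i+7] exists iff 7 chars remain, so the
-- 7-char window is matched as the first seven chars of the current suffix;
-- 'w.startswith("172.") and w.endswith(".") and w[4].isdigit() and w[5].isdigit()
--  and 16 <= (ord(w[4])-48)*10 + (ord(w[5])-48) <= 31'
def pvHit172 (t : List Char) : Bool :=
  match t with
  | a :: b :: c :: d :: e :: f :: g :: _ =>
      PySem.Chars.startswith [a,b,c,d,e,f,g] "172.".toList &&
      PySem.Chars.endswith [a,b,c,d,e,f,g] ".".toList &&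
      PySem.Chars.isdigit e && PySem.Chars.isdigit f &&
      decide (16 ≤ (e.toNat - 48) * 10 + (f.toNat - 48) ∧
              (e.toNat - 48) * 10 + (f.toNat - 48) ≤ 31)
  | _ => false

-- 'for i in range(len(s) - 6): …' — the index loop over window start positions,
-- realised as structural recursion over the suffixes of s
def pvScan172 (s : List Char) : Bool :=
  match s with
  | [] => false
  | c :: rest => pvHit172 (c :: rest) || pvScan172 rest

def validate_network_target_py_alt (url : String) : Bool :=
  if url.toList = [] then false
  else
    let s := PySem.Chars.lower url.toList
    if pvAnySimple s then false
    else !pvScan172 s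

-- ===== PRECONDITION & SPEC =====
def Spec_validate_network_target_py (url : String) (out : Bool) : Prop := out = validate_network_target_py_alt url
instance (url : String) (out : Bool) : Decidable (Spec_validate_network_target_py url out) := by unfold Spec_validate_network_target_py; infer_instance

-- ===== CLAIM (what is proved, stated in full; the proofs are below) =====
def Claim_equal_validate_network_target_py : Prop := ∀ (url : String), Dom_validate_network_target_py url → Spec_validate_network_target_py url (validate_network_target_py url)

-- ===== LEMMAS AND PROOFS =====

-- the sixteen '172.16.'–'172.31.' patterns of A that B's window scan replaces
def pv172 : List (List Char) :=
  ["172.16.".toList, "172.17.".toList, "172.18.".toList, "172.19.".toList,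
   "172.20.".toList, "172.21.".toList, "172.22.".toList, "172.23.".toList,
   "172.24.".toList, "172.25.".toList, "172.26.".toList, "172.27.".toList,
   "172.28.".toList, "172.29.".toList, "172.30.".toList, "172.31.".toList]

lemma isDigit_iff (c : Char) : c.isDigit = true ↔ 48 ≤ c.toNat ∧ c.toNat ≤ 57 := by
  rw [Char.isDigit]
  simp only [ge_iff_le, Bool.and_eq_true, decide_eq_true_eq, UInt32.le_iff_toNat_le, Char.toNat_val]
  rw [show '0'.toNat = 48 from rfl, show '9'.toNat = 57 from rfl]

lemma char_eq_of_toNat {c d : Char} (h : c.toNat = d.toNat) : c = d :=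
  Char.ext (UInt32.toNat_inj.mp h)

-- an ASCII digit is one of '0'..'9'
lemma digit_enum (f : Char) (hf : f.isDigit = true) :
    f = '0' ∨ f = '1' ∨ f = '2' ∨ f = '3' ∨ f = '4' ∨ f = '5' ∨ f = '6' ∨ f = '7' ∨ f = '8' ∨ f = '9' := by
  rw [isDigit_iff] at hf
  have h2 : f.toNat = 48 ∨ f.toNat = 49 ∨ f.toNat = 50 ∨ f.toNat = 51 ∨ f.toNat = 52 ∨
      f.toNat = 53 ∨ f.toNat = 54 ∨ f.toNat = 55 ∨ f.toNat = 56 ∨ f.toNat = 57 := by omega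
  rcases h2 with h2|h2|h2|h2|h2|h2|h2|h2|h2|h2
  · exact Or.inl (char_eq_of_toNat (by rw [h2]; rfl))
  · exact Or.inr (Or.inl (char_eq_of_toNat (by rw [h2]; rfl)))
  · exact Or.inr (Or.inr (Or.inl (char_eq_of_toNat (by rw [h2]; rfl))))
  · exact Or.inr (Or.inr (Or.inr (Or.inl (char_eq_of_toNat (by rw [h2]; rfl)))))
  · exact Or.inr (Or.inr (Or.inr (Or.inr (Or.inl (char_eq_of_toNat (by rw [h2]; rfl))))))
  · exact Or.inr (Or.inr (Or.inr (Or.inr (Or.inr (Or.inl (char_eq_of_toNat (by rw [h2]; rfl)))))))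
  · exact Or.inr (Or.inr (Or.inr (Or.inr (Or.inr (Or.inr (Or.inl (char_eq_of_toNat (by rw [h2]; rfl))))))))
  · exact Or.inr (Or.inr (Or.inr (Or.inr (Or.inr (Or.inr (Or.inr (Or.inl (char_eq_of_toNat (by rw [h2]; rfl)))))))))
  · exact Or.inr (Or.inr (Or.inr (Or.inr (Or.inr (Or.inr (Or.inr (Or.inr (Or.inl (char_eq_of_toNat (by rw [h2]; rfl))))))))))
  · exact Or.inr (Or.inr (Or.inr (Or.inr (Or.inr (Or.inr (Or.inr (Or.inr (Or.inr (char_eq_of_toNat (by rw [h2]; rfl))))))))))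

-- two ASCII digits whose value lies in 16..31 are exactly the pairs '16'..'31'
lemma digitpair (e f : Char)
    (he : e.isDigit = true) (hf : f.isDigit = true)
    (h : 16 ≤ (e.toNat - 48) * 10 + (f.toNat - 48) ∧ (e.toNat - 48) * 10 + (f.toNat - 48) ≤ 31) :
    (e = '1' ∧ (f = '6' ∨ f = '7' ∨ f = '8' ∨ f = '9')) ∨
    (e = '2' ∧ f.isDigit = true) ∨
    (e = '3' ∧ (f = '0' ∨ f = '1')) := by
  rw [isDigit_iff] at he
  have hf' := (isDigit_iff f).mp hf
  have he' : e.toNat = 49 ∨ e.toNat = 50 ∨ e.toNat = 51 := by omega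
  rcases he' with h1 | h1 | h1
  · refine Or.inl ⟨char_eq_of_toNat (by rw [h1]; rfl), ?_⟩
    have h2 : f.toNat = 54 ∨ f.toNat = 55 ∨ f.toNat = 56 ∨ f.toNat = 57 := by omega
    rcases h2 with h2|h2|h2|h2
    · exact Or.inl (char_eq_of_toNat (by rw [h2]; rfl))
    · exact Or.inr (Or.inl (char_eq_of_toNat (by rw [h2]; rfl)))
    · exact Or.inr (Or.inr (Or.inl (char_eq_of_toNat (by rw [h2]; rfl))))
    · exact Or.inr (Or.inr (Or.inr (char_eq_of_toNat (by rw [h2]; rfl))))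
  · exact Or.inr (Or.inl ⟨char_eq_of_toNat (by rw [h1]; rfl), hf⟩)
  · refine Or.inr (Or.inr ⟨char_eq_of_toNat (by rw [h1]; rfl), ?_⟩)
    have h2 : f.toNat = 48 ∨ f.toNat = 49 := by omega
    rcases h2 with h2|h2
    · exact Or.inl (char_eq_of_toNat (by rw [h2]; rfl))
    · exact Or.inr (char_eq_of_toNat (by rw [h2]; rfl))

-- a pattern of pv172 starting at the current position makes the window test fire
lemma hit_of_mem {p t : List Char} (hp : p ∈ pv172) (hpre : p <+: t) :
    pvHit172 t = true := by
  obtain ⟨u, hu⟩ := hpre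
  subst hu
  fin_cases hp <;> rfl

-- conversely the window test fires only where some pv172 pattern starts
lemma mem_of_hit {t : List Char} (h : pvHit172 t = true) :
    ∃ p ∈ pv172, p <+: t := by
  match t with
  | [] => exact absurd h (by simp [pvHit172])
  | [a] => exact absurd h (by simp [pvHit172])
  | [a,b] => exact absurd h (by simp [pvHit172])
  | [a,b,c] => exact absurd h (by simp [pvHit172])
  | [a,b,c,d] => exact absurd h (by simp [pvHit172])
  | [a,b,c,d,e] => exact absurd h (by simp [pvHit172])
  | [a,b,c,d,e,f] => exact absurd h (by simp [pvHit172])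
  | a :: b :: c :: d :: e :: f :: g :: r =>
    simp [pvHit172, PySem.Chars.startswith, PySem.Chars.endswith, List.isSuffixOf_iff_suffix,
      List.suffix_cons_iff, List.isPrefixOf_iff_prefix, List.cons_prefix_cons] at h
    obtain ⟨⟨⟨⟨⟨ha, hb, hc, hd⟩, hg⟩, he⟩, hf⟩, hval⟩ := h
    subst ha; subst hb; subst hc; subst hd; subst hg
    have he' : e.isDigit = true := he
    have hf' : f.isDigit = true := hf
    rcases digitpair e f he' hf' hval with ⟨rfl, hf6⟩ | ⟨rfl, hfd⟩ | ⟨rfl, hf6⟩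
    · rcases hf6 with rfl | rfl | rfl | rfl
      · exact ⟨"172.16.".toList, by decide, ⟨r, rfl⟩⟩
      · exact ⟨"172.17.".toList, by decide, ⟨r, rfl⟩⟩
      · exact ⟨"172.18.".toList, by decide, ⟨r, rfl⟩⟩
      · exact ⟨"172.19.".toList, by decide, ⟨r, rfl⟩⟩
    · rcases digit_enum f hfd with rfl|rfl|rfl|rfl|rfl|rfl|rfl|rfl|rfl|rfl
      · exact ⟨"172.20.".toList, by decide, ⟨r, rfl⟩⟩
      · exact ⟨"172.21.".toList, by decide, ⟨r, rfl⟩⟩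
      · exact ⟨"172.22.".toList, by decide, ⟨r, rfl⟩⟩
      · exact ⟨"172.23.".toList, by decide, ⟨r, rfl⟩⟩
      · exact ⟨"172.24.".toList, by decide, ⟨r, rfl⟩⟩
      · exact ⟨"172.25.".toList, by decide, ⟨r, rfl⟩⟩
      · exact ⟨"172.26.".toList, by decide, ⟨r, rfl⟩⟩
      · exact ⟨"172.27.".toList, by decide, ⟨r, rfl⟩⟩
      · exact ⟨"172.28.".toList, by decide, ⟨r, rfl⟩⟩
      · exact ⟨"172.29.".toList, by decide, ⟨r, rfl⟩⟩
    · rcases hf6 with rfl | rfl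
      · exact ⟨"172.30.".toList, by decide, ⟨r, rfl⟩⟩
      · exact ⟨"172.31.".toList, by decide, ⟨r, rfl⟩⟩

-- the suffix scan fires iff some pv172 pattern occurs somewhere in s
lemma pvScan172_iff (s : List Char) :
    pvScan172 s = true ↔ ∃ p ∈ pv172, p <:+: s := by
  induction s with
  | nil =>
    simp only [pvScan172]
    constructor
    · intro h; exact absurd h (by simp)
    · rintro ⟨p, hp, hinf⟩
      have hne : p ≠ [] := by
        have : ∀ q ∈ pv172, q ≠ [] := by decide
        exact this p hp
      exact absurd (List.eq_nil_of_infix_nil hinf) hne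
  | cons c rest ih =>
    simp only [pvScan172, Bool.or_eq_true, ih]
    constructor
    · rintro (h | ⟨p, hp, hinf⟩)
      · obtain ⟨p, hp, hpre⟩ := mem_of_hit h
        exact ⟨p, hp, hpre.isInfix⟩
      · exact ⟨p, hp, hinf.trans (List.infix_cons (List.infix_refl rest))⟩
    · rintro ⟨p, hp, hinf⟩
      rcases List.infix_cons_iff.mp hinf with hpre | hinf'
      · exact Or.inl (hit_of_mem hp hpre)
      · exact Or.inr ⟨p, hp, hinf'⟩

lemma pvAnySimple_iff (s : List Char) :
    pvAnySimple s = true ↔ ∃ p ∈ pvSimpleB, p <:+: s := by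
  simp only [pvAnySimple, List.any_eq_true]
  constructor
  · rintro ⟨p, hp, h⟩; exact ⟨p, hp, (PySem.Chars.isIn_iff_infix p s).mp h⟩
  · rintro ⟨p, hp, h⟩; exact ⟨p, hp, (PySem.Chars.isIn_iff_infix p s).mpr h⟩

-- A's early-exit loop returns true iff no pattern occurs as a substring
lemma pvLoopA_eq_true_iff (ps : List (List Char)) (s : List Char) :
    pvLoopA ps s = true ↔ ∀ p ∈ ps, ¬ p <:+: s := by
  induction ps with
  | nil => simp [pvLoopA]
  | cons p rest ih =>
    simp only [pvLoopA]
    cases hb : PySem.Chars.isIn p s with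
    | true =>
      have hinf : p <:+: s := (PySem.Chars.isIn_iff_infix p s).mp hb
      simp [hinf]
    | false =>
      have hni : ¬ p <:+: s := (PySem.Chars.isIn_eq_false_iff p s).mp hb
      simp [ih, hni]

-- A's 26 patterns occur in s iff B's 9 simple ones or one of the 16 '172.nn.' do
-- ('169.254.169.254' is subsumed by its prefix '169.254.')
lemma blocked_split (s : List Char) :
    (∀ p ∈ pvBlockedA, ¬ p <:+: s) ↔
    (∀ p ∈ pvSimpleB, ¬ p <:+: s) ∧ (∀ p ∈ pv172, ¬ p <:+: s) := by
  constructor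
  · intro h
    have hs : ∀ p ∈ pvSimpleB, p ∈ pvBlockedA := by decide
    have h7 : ∀ p ∈ pv172, p ∈ pvBlockedA := by decide
    exact ⟨fun p hp => h p (hs p hp), fun p hp => h p (h7 p hp)⟩
  · rintro ⟨h1, h2⟩ p hp
    have hmem : p = "169.254.169.254".toList ∨ p ∈ pvSimpleB ∨ p ∈ pv172 := by
      have hall : ∀ q ∈ pvBlockedA, q = "169.254.169.254".toList ∨ q ∈ pvSimpleB ∨ q ∈ pv172 := by
        decide
      exact hall p hp
    rcases hmem with rfl | hp' | hp'
    · intro hinf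
      exact h1 "169.254.".toList (by decide)
        (List.IsInfix.trans (by decide : "169.254.".toList <:+: "169.254.169.254".toList) hinf)
    · exact h1 p hp'
    · exact h2 p hp'

lemma main_eq (s : List Char) :
    pvLoopA pvBlockedA s = (!pvAnySimple s && !pvScan172 s) := by
  rcases h : (!pvAnySimple s && !pvScan172 s) with _ | _
  · cases hA : pvLoopA pvBlockedA s
    · rfl
    · exfalso
      have hnone := (pvLoopA_eq_true_iff _ _).mp hA
      obtain ⟨hsimp, h172⟩ := (blocked_split s).mp hnone
      rcases Bool.and_eq_false_iff.mp h with h' | h'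
      · obtain ⟨p, hp, hinf⟩ := (pvAnySimple_iff s).mp (by simpa using h')
        exact hsimp p hp hinf
      · obtain ⟨p, hp, hinf⟩ := (pvScan172_iff s).mp (by simpa using h')
        exact h172 p hp hinf
  · obtain ⟨h1, h2⟩ := Bool.and_eq_true_iff.mp h
    refine (pvLoopA_eq_true_iff _ _).mpr ((blocked_split s).mpr ⟨?_, ?_⟩)
    · intro p hp hinf
      have : pvAnySimple s = true := (pvAnySimple_iff s).mpr ⟨p, hp, hinf⟩
      simp [this] at h1
    · intro p hp hinf
      have : pvScan172 s = true := (pvScan172_iff s).mpr ⟨p, hp, hinf⟩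
      simp [this] at h2

-- ===== VERDICT (by name: the statement is the Claim_ definition above) =====
theorem validate_network_target_py_spec : Claim_equal_validate_network_target_py := by
  intro url _
  unfold Spec_validate_network_target_py validate_network_target_py validate_network_target_py_alt
  by_cases h : url.toList = []
  · simp [h]
  · simp only [h, if_false]
    rw [main_eq]
    cases pvAnySimple (PySem.Chars.lower url.toList) <;> rfl
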